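-- pv_equiv track=rewrite | github.com/pborenstein/obsidian-tag-tools | tagex/utils/plural_normalizer.py | get_preferred_form
-- ===== SOURCE A (Python) =====
-- from typing import Set
--
-- IRREGULAR_PLURALS = {
--     'child': 'children',
--     'person': 'people',
--     'man': 'men',
--     'woman': 'women',
--     'tooth': 'teeth',
--     'foot': 'feet',
--     'mouse': 'mice',
--     'goose': 'geese',
--     'life': 'lives',
--     'knife': 'knives',
--     'leaf': 'leaves',
--     'self': 'selves',
--     'elf': 'elves',
--     'half': 'halves',
--     'ox': 'oxen',
--     'crisis': 'crises',
--     'analysis': 'analyses',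
--     'thesis': 'theses',
--     'phenomenon': 'phenomena',
--     'criterion': 'criteria',
-- }
--
-- def get_preferred_form(forms: Set[str], usage_counts: dict = None) -> str:
--     """Get the preferred canonical form from a set of variants.
--
--     Convention: Prefer plural forms unless singular is significantly more common.
--
--     Args:
--         forms: Set of tag variants
--         usage_counts: Optional dict mapping tags to usage counts
--
--     Returns:
--         The preferred canonical form (usually plural)
--     """
--     if not forms:
--         return ''
--
--     forms_list = list(forms)
--
--     # If usage counts provided, strongly prefer the most-used form
--     if usage_counts:
--         counted_forms = [f for f in forms_list if f in usage_counts]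
--         if counted_forms:
--             max_usage = max(usage_counts[f] for f in counted_forms)
--             most_used = [f for f in counted_forms if usage_counts[f] == max_usage]
--
--             # If one form is significantly more common (5x), use it
--             other_forms = [f for f in counted_forms if usage_counts[f] != max_usage]
--             if other_forms:
--                 max_other = max(usage_counts[f] for f in other_forms)
--                 if max_usage >= max_other * 5:
--                     return most_used[0]
--
--     # Otherwise prefer plural form
--     # Sort by: 1) plural preference, 2) length (longer usually plural), 3) alphabetical
--     return max(forms_list, key=lambda t: (
--         t.lower().endswith('s') or t.lower() in IRREGULAR_PLURALS.values(),  # Prefer plurals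
--         len(t),  # Longer forms (often plurals)
--         t.lower()  # Alphabetical for tiebreaker
--     ))
-- ===== SOURCE B (Python) =====
-- # B: single streaming pass over forms tracking (first max-usage form, its usage,
-- # best strictly-lower usage) instead of A's five filter/max passes and intermediate lists (measured constant-factor speedup).
-- IRREGULAR_PLURALS = {
--     'child': 'children', 'person': 'people', 'man': 'men', 'woman': 'women',
--     'tooth': 'teeth', 'foot': 'feet', 'mouse': 'mice', 'goose': 'geese',
--     'life': 'lives', 'knife': 'knives', 'leaf': 'leaves', 'self': 'selves',
--     'elf': 'elves', 'half': 'halves', 'ox': 'oxen', 'crisis': 'crises',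
--     'analysis': 'analyses', 'thesis': 'theses', 'phenomenon': 'phenomena',
--     'criterion': 'criteria',
-- }
-- _PLURAL_FORMS = set(IRREGULAR_PLURALS.values())
--
-- def get_preferred_form(forms, usage_counts=None):
--     if not forms:
--         return ''
--
--     if usage_counts:
--         # One pass: top = (first form attaining the running max usage, that usage);
--         # best_lower = greatest usage seen that is strictly below the running max.
--         top = None
--         best_lower = None
--         for f in forms:
--             if f not in usage_counts:
--                 continue
--             u = usage_counts[f]
--             if top is None:
--                 top = (f, u)
--             elif u > top[1]:
--                 best_lower = top[1] if best_lower is None else max(best_lower, top[1])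
--                 top = (f, u)
--             elif u < top[1]:
--                 best_lower = u if best_lower is None else max(best_lower, u)
--         if top is not None and best_lower is not None and top[1] >= best_lower * 5:
--             return top[0]
--
--     # Plural preference: explicit best-so-far scan (strict improvement keeps first winner).
--     best = None
--     for t in forms:
--         low = t.lower()
--         k = (low.endswith('s') or low in _PLURAL_FORMS, len(t), low)
--         if best is None or k > best[0]:
--             best = (k, t)
--     return best[1]
-- ===== Notes on version B (the rewrite author's own statement) =====
-- stated objective: faster
-- what changed: The usage-count branch's five passes (filter counted forms, max usage, filter most-used forms, filter others, max other) are replaced by ONE streaming pass over forms tracking (first max-usage form, its usage, best strictly-lower usage), and the final max(..., key=...) by an explicit best-so-far scan; no intermediate lists are built.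
import Mathlib
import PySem

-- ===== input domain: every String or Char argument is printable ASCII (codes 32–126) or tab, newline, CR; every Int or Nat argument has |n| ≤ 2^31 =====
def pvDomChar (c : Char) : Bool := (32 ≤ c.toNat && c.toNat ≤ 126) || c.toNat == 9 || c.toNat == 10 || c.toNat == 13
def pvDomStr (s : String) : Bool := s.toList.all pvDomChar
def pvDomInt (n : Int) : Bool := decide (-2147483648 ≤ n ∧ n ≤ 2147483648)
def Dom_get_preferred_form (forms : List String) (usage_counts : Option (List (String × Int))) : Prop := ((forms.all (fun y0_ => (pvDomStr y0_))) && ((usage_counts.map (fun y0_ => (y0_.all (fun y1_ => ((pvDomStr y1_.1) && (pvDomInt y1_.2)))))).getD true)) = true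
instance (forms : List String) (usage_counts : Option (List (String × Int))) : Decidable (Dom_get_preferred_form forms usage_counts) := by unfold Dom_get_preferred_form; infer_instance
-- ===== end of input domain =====

-- B replaces A's five filter/max passes over the usage counts by ONE streaming pass
-- tracking (first max-usage form, its usage, best strictly-lower usage), and A's
-- `max(..., key=…)` by an explicit best-so-far scan; measured constant-factor speedup.

-- values of IRREGULAR_PLURALS (shared module constant)
def pluralValues : List String :=
  ["children", "people", "men", "women", "teeth", "feet", "mice", "geese",
   "lives", "knives", "leaves", "selves", "elves", "halves", "oxen",
   "crises", "analyses", "theses", "phenomena", "criteria"]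

-- the key tuple  (t.lower().endswith('s') or t.lower() in IRREGULAR_PLURALS.values(), len(t), t.lower())
def pluralKey (t : String) : Bool × Int × String :=
  let low := PySem.Str.lower t
  ((PySem.Str.endswith low "s" || pluralValues.contains low), PySem.Str.len t, low)

-- Python's lexicographic '<' on that (bool, int, str) tuple
def keyLtB (a b : Bool × Int × String) : Bool :=
  (!a.1 && b.1) ||
    (a.1 == b.1 && (decide (a.2.1 < b.2.1) ||
      (a.2.1 == b.2.1 && decide (a.2.2 < b.2.2))))

-- Python's max(...) over a nonempty int list: running-max loop seeded with the head
def intMax (x : Int) (xs : List Int) : Int := xs.foldl max x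

-- ===== PORT A =====
-- the usage-count branch of A: `some r` exactly when A executes `return most_used[0]`
def aUsageBranch (forms : List String) (d : PySem.Dict String Int) : Option String :=
  let counted := forms.filter (fun f => d.contains f)
  match counted with
  | [] => none
  | c :: cs =>
    let maxUsage := intMax (d.getD c 0) (cs.map (fun f => d.getD f 0))
    let mostUsed := counted.filter (fun f => decide (d.getD f 0 = maxUsage))
    let otherForms := counted.filter (fun f => !decide (d.getD f 0 = maxUsage))
    match otherForms with
    | [] => none
    | o :: os =>
      let maxOther := intMax (d.getD o 0) (os.map (fun f => d.getD f 0))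
      if maxOther * 5 ≤ maxUsage then some (mostUsed.headD "") else none

def get_preferred_form (forms : List String) (usage_counts : Option (List (String × Int))) : String :=
  if forms = [] then ""
  else
    match (match usage_counts with
      | none => none
      | some ps =>
        if ps = [] then none
        else aUsageBranch forms (PySem.Dict.ofList ps)) with
    | some r => r
    | none =>
      -- max(forms_list, key=…): first maximal element
      match forms with
      | [] => ""
      | x :: xs => xs.foldl (fun best t => if keyLtB (pluralKey best) (pluralKey t) then t else best) x

-- ===== PORT B =====
-- one step of B's streaming pass; state = (top = (form, usage)?, best_lower?)
def bStep (d : PySem.Dict String Int) (st : Option (String × Int) × Option Int) (f : String) :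
    Option (String × Int) × Option Int :=
  if d.contains f then
    let u := d.getD f 0
    match st with
    | (none, bl) => (some (f, u), bl)
    | (some (t, tu), bl) =>
      if tu < u then (some (f, u), some (match bl with | none => tu | some b => max b tu))
      else if u < tu then (some (t, tu), some (match bl with | none => u | some b => max b u))
      else (some (t, tu), bl)
  else st

def get_preferred_form_alt (forms : List String) (usage_counts : Option (List (String × Int))) : String :=
  if forms = [] then ""
  else
    match (match usage_counts with
      | none => none
      | some ps =>
        if ps = [] then none
        else
          match forms.foldl (bStep (PySem.Dict.ofList ps)) (none, none) with
          | (some (t, tu), some bl) => if bl * 5 ≤ tu then some t else none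
          | _ => none) with
    | some r => r
    | none =>
      -- best-so-far scan over forms with an Option accumulator
      match forms.foldl (fun (best : Option ((Bool × Int × String) × String)) t =>
          let k := pluralKey t
          match best with
          | none => some (k, t)
          | some (bk, bt) => if keyLtB bk k then some (k, t) else some (bk, bt)) none with
      | some (_, t) => t
      | none => ""

-- ===== PRECONDITION & SPEC =====
def Spec_get_preferred_form (forms : List String) (usage_counts : Option (List (String × Int))) (out : String) : Prop := out = get_preferred_form_alt forms usage_counts
instance (forms : List String) (usage_counts : Option (List (String × Int))) (out : String) : Decidable (Spec_get_preferred_form forms usage_counts out) := by unfold Spec_get_preferred_form; infer_instance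

-- ===== CLAIM (what is proved, stated in full; the proofs are below) =====
def Claim_equal_get_preferred_form : Prop := ∀ (forms : List String) (usage_counts : Option (List (String × Int))), Dom_get_preferred_form forms usage_counts → Spec_get_preferred_form forms usage_counts (get_preferred_form forms usage_counts)

-- ===== LEMMAS AND PROOFS =====

theorem plural_fold_eq (xs : List String) : ∀ (b : String),
    xs.foldl (fun (best : Option ((Bool × Int × String) × String)) t =>
        let k := pluralKey t
        match best with
        | none => some (k, t)
        | some (bk, bt) => if keyLtB bk k then some (k, t) else some (bk, bt))
      (some (pluralKey b, b))
    = some (pluralKey (xs.foldl (fun best t => if keyLtB (pluralKey best) (pluralKey t) then t else best) b),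
            xs.foldl (fun best t => if keyLtB (pluralKey best) (pluralKey t) then t else best) b) := by
  induction xs with
  | nil => intro b; rfl
  | cons x xs ih =>
    intro b
    simp only [List.foldl_cons]
    by_cases h : keyLtB (pluralKey b) (pluralKey x) = true
    · simp [h, ih]
    · simp [h, ih]

-- spec of B's streaming state, phrased over the already-filtered ("counted") list
def bSpecC (d : PySem.Dict String Int) (counted : List String) : Option (String × Int) × Option Int :=
  match counted with
  | [] => (none, none)
  | c :: cs =>
    let maxUsage := intMax (d.getD c 0) (cs.map (fun f => d.getD f 0))
    (some (((c :: cs).filter (fun f => decide (d.getD f 0 = maxUsage))).headD "", maxUsage),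
     match (c :: cs).filter (fun f => !decide (d.getD f 0 = maxUsage)) with
     | [] => none
     | o :: os => some (intMax (d.getD o 0) (os.map (fun f => d.getD f 0))))

theorem le_intMax_self (x : Int) (xs : List Int) : x ≤ intMax x xs :=
  (PySem.List.le_foldl_max xs x).1

theorem le_intMax_mem (x : Int) (xs : List Int) : ∀ y ∈ xs, y ≤ intMax x xs :=
  (PySem.List.le_foldl_max xs x).2

theorem intMax_le (x c : Int) (xs : List Int) (hx : x ≤ c) (h : ∀ y ∈ xs, y ≤ c) :
    intMax x xs ≤ c := by
  induction xs generalizing x with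
  | nil => exact hx
  | cons a as ih =>
    exact ih (max x a) (max_le hx (h a (by simp))) (fun y hy => h y (by simp [hy]))

theorem intMax_append (x a : Int) (xs : List Int) :
    intMax x (xs ++ [a]) = max (intMax x xs) a := by
  simp [intMax, List.foldl_append]

-- one step of B's pass on a counted element updates the spec state
theorem bStep_bSpecC (d : PySem.Dict String Int) (f : String) (hm : d.contains f = true)
    (counted : List String) :
    bStep d (bSpecC d counted) f = bSpecC d (counted ++ [f]) := by
  cases counted with
  | nil => simp [bSpecC, bStep, hm, intMax]
  | cons c cs =>
    unfold bSpecC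
    simp only [List.cons_append]
    rw [show c :: (cs ++ [f]) = (c :: cs) ++ [f] from rfl]
    rw [List.filter_append, List.filter_append, List.filter_singleton, List.filter_singleton]
    simp only [Bool.cond_not, Bool.cond_decide]
    have hmapapp : (cs ++ [f]).map (fun f => d.getD f 0)
        = cs.map (fun f => d.getD f 0) ++ [d.getD f 0] := by simp
    rw [hmapapp, intMax_append]
    set u := d.getD f (0:Int) with hu
    set M := intMax (d.getD c 0) (cs.map (fun f => d.getD f 0)) with hM
    have hallle : ∀ g ∈ c :: cs, d.getD g 0 ≤ M := by
      intro g hg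
      rcases List.mem_cons.mp hg with rfl | hg
      · exact le_intMax_self _ _
      · exact le_intMax_mem _ _ _ (List.mem_map_of_mem hg)
    rcases lt_trichotomy M u with hlt | heq | hgt
    · -- new strict max: top becomes (f, u)
      rw [max_eq_right hlt.le]
      have hne : ∀ g ∈ c :: cs, ¬ (d.getD g 0 = u) := by
        intro g hg h'; exact absurd (h' ▸ hallle g hg) (not_le.mpr hlt)
      have hfe : (c :: cs).filter (fun f => decide (d.getD f 0 = u)) = [] := by
        apply List.filter_eq_nil_iff.mpr; intro g hg; simpa using hne g hg
      have hfo : (c :: cs).filter (fun f => !decide (d.getD f 0 = u)) = c :: cs := by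
        apply List.filter_eq_self.mpr; intro g hg; simpa using hne g hg
      rw [hfe, hfo, if_pos rfl, if_pos rfl, List.nil_append, List.append_nil]
      cases ho : (c :: cs).filter (fun f => !decide (d.getD f 0 = M)) with
      | nil =>
        simp [bStep, hm, ← hu, hlt, ← hM]
      | cons o os =>
        have hole : intMax (d.getD o 0) (os.map (fun f => d.getD f 0)) ≤ M := by
          apply intMax_le
          · exact hallle o (List.mem_of_mem_filter (ho ▸ List.mem_cons_self ..))
          · intro y hy
            obtain ⟨g, hg, rfl⟩ := List.mem_map.mp hy
            exact hallle g (List.mem_of_mem_filter (ho ▸ List.mem_cons_of_mem _ hg))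
        have hmaxo : max (intMax (d.getD o 0) (os.map (fun f => d.getD f 0))) M = M :=
          max_eq_right hole
        simp [bStep, hm, ← hu, hlt, hmaxo, ← hM]
    · -- tie with the max: state unchanged
      rw [max_eq_left heq.ge]
      rw [if_pos (show d.getD f 0 = M from heq.symm), if_pos (show d.getD f 0 = M from heq.symm), List.append_nil]
      have hnonnil : (c :: cs).filter (fun f => decide (d.getD f 0 = M)) ≠ [] := by
        have hMmem : M = d.getD c 0 ∨ M ∈ cs.map (fun f => d.getD f 0) := by
          have := PySem.List.foldl_max_mem (cs.map (fun f => d.getD f 0)) (d.getD c 0)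
          simpa [hM, intMax] using this
        intro hnil
        have hall := List.filter_eq_nil_iff.mp hnil
        rcases hMmem with h | h
        · exact (by simpa [h] using hall c (List.mem_cons_self ..))
        · obtain ⟨g, hg, hgeq⟩ := List.mem_map.mp h
          exact (by simpa [hgeq] using hall g (List.mem_cons_of_mem _ hg))
      have hheadD : ((c :: cs).filter (fun f => decide (d.getD f 0 = M)) ++ [f]).headD ""
          = ((c :: cs).filter (fun f => decide (d.getD f 0 = M))).headD "" := by
        cases hfc : (c :: cs).filter (fun f => decide (d.getD f 0 = M)) with
        | nil => exact absurd hfc hnonnil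
        | cons a as => simp
      rw [hheadD]
      cases hoc : (c :: cs).filter (fun f => !decide (d.getD f 0 = M)) <;>
        simp [bStep, hm, ← hu, ← heq]
    · -- strictly lower usage: only best_lower moves
      rw [max_eq_left hgt.le]
      rw [if_neg (show ¬ d.getD f 0 = M by intro h; rw [← hu] at h; omega), if_neg (show ¬ d.getD f 0 = M by intro h; rw [← hu] at h; omega), List.append_nil]
      cases ho : (c :: cs).filter (fun f => !decide (d.getD f 0 = M)) with
      | nil =>
        simp [bStep, hm, ← hu, hgt, not_lt.mpr hgt.le, intMax]
      | cons o os =>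
        simp [bStep, hm, ← hu, hgt, not_lt.mpr hgt.le, intMax_append]

-- B's fold computes exactly bSpecC of the counted sublist (invariant of the streaming pass)
theorem bFold_eq_bSpecC (d : PySem.Dict String Int) (fs : List String) :
    fs.foldl (bStep d) (none, none) = bSpecC d (fs.filter (fun f => d.contains f)) := by
  induction fs using List.reverseRecOn with
  | nil => rfl
  | append_singleton fs f ih =>
    rw [List.foldl_append, List.foldl_cons, List.foldl_nil, ih, List.filter_append,
      List.filter_singleton]
    by_cases hm : d.contains f
    · rw [hm, cond_true]
      exact bStep_bSpecC d f hm _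
    · rw [Bool.not_eq_true] at hm
      rw [hm, cond_false, List.append_nil]
      simp [bStep, hm]

-- the two usage branches agree
theorem usage_branch_eq (d : PySem.Dict String Int) (fs : List String) :
    (match fs.foldl (bStep d) (none, none) with
     | (some (t, tu), some bl) => if bl * 5 ≤ tu then some t else none
     | _ => none)
    = aUsageBranch fs d := by
  rw [bFold_eq_bSpecC]
  unfold bSpecC aUsageBranch
  cases hc : fs.filter (fun f => d.contains f) with
  | nil => rfl
  | cons c cs =>
    simp only
    cases ho : (c :: cs).filter
        (fun f => !decide (d.getD f 0 = intMax (d.getD c 0) (cs.map (fun f => d.getD f 0)))) with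
    | nil => rfl
    | cons o os => rfl

-- ===== VERDICT (by name: the statement is the Claim_ definition above) =====
theorem get_preferred_form_spec : Claim_equal_get_preferred_form := by
  intro forms usage_counts hd
  clear hd
  unfold Spec_get_preferred_form get_preferred_form get_preferred_form_alt
  cases forms with
  | nil => rfl
  | cons x xs =>
    rw [if_neg (by simp : ¬ (x :: xs = [])), if_neg (by simp : ¬ (x :: xs = []))]
    have hplural : (match (x :: xs).foldl (fun (best : Option ((Bool × Int × String) × String)) t =>
          let k := pluralKey t
          match best with
          | none => some (k, t)
          | some (bk, bt) => if keyLtB bk k then some (k, t) else some (bk, bt)) none with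
        | some (_, t) => t
        | none => "")
        = xs.foldl (fun best t => if keyLtB (pluralKey best) (pluralKey t) then t else best) x := by
      simp only [List.foldl_cons]
      rw [plural_fold_eq xs x]
    cases usage_counts with
    | none => simpa using hplural.symm
    | some ps =>
      by_cases hps : ps = []
      · simp only [hps, if_pos]
        simpa using hplural.symm
      · simp only [if_neg hps]
        rw [← usage_branch_eq (PySem.Dict.ofList ps) (x :: xs)]
        cases (x :: xs).foldl (bStep (PySem.Dict.ofList ps)) (none, none) with
        | mk top bl =>
          cases top with
          | none => simpa using hplural.symm
          | some t =>
            cases t with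
            | mk tf tu =>
              cases bl with
              | none => simpa using hplural.symm
              | some b =>
                by_cases h5 : b * 5 ≤ tu
                · simp [h5]
                · simp only [if_neg h5]
                  simpa using hplural.symm
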